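-- pv_equiv track=rewrite | github.com/mranthony89/analizzatorephp | analizzatore.py | _is_in_html_block
-- ===== SOURCE A (Python) =====
-- from typing import List, Dict, Tuple, Optional
--
-- def _is_in_html_block(lines: List[str], line_num: int) -> bool:
--     """Verifica se una linea è all'interno di un blocco HTML (dopo ?>)"""
--     in_php = True
--     for i in range(line_num):
--         if '<?php' in lines[i] or '<?' in lines[i]:
--             in_php = True
--         elif '?>' in lines[i]:
--             in_php = False
--     return not in_php
-- ===== SOURCE B (Python) =====
-- def _is_in_html_block(lines, line_num):
--     """Backward scan: the nearest preceding marker decides (open '<?'/'<?php' -> still PHP, close '?>' -> HTML); no marker -> PHP."""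
--     for i in reversed(range(line_num)):
--         line = lines[i]
--         if '<?' in line:
--             return False
--         if '?>' in line:
--             return True
--     return False
-- ===== Notes on version B (the rewrite author's own statement) =====
-- stated objective: alternative
-- what changed: Replaces the forward replay of every PHP/HTML transition into a boolean accumulator by a backward scan that returns at the first (i.e. nearest preceding) marker, so lines before the decisive marker are never inspected.
import Mathlib
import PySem

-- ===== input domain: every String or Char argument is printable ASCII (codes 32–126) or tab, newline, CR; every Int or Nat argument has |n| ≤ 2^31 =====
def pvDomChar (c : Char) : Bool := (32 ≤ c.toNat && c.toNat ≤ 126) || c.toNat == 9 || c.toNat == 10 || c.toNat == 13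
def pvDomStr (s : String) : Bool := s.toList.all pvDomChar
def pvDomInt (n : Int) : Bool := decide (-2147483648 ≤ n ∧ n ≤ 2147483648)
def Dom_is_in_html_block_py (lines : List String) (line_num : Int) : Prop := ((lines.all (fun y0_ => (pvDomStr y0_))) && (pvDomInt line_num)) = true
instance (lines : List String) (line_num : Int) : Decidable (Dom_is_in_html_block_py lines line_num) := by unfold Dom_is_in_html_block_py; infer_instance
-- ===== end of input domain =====

-- B replaces A's forward fold over all transitions by a backward scan returning at the nearest preceding marker (alternative decomposition, same result).


-- ===== PORT A =====
def is_in_html_block_py (lines : List String) (line_num : Int) : Bool :=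
  let in_php := (PySem.List.pyRange 0 line_num 1).foldl
    (fun in_php i =>
      let line := PySem.List.pyGetD lines i ""
      if PySem.Str.isIn "<?php" line || PySem.Str.isIn "<?" line then true
      else if PySem.Str.isIn "?>" line then false
      else in_php) true
  !in_php

-- ===== PORT B =====
-- backward scan: index n means Python's lines[n] for n = line_num-1, line_num-2, …, 0
def pvAltGo (lines : List String) : Nat → Bool
  | 0 => false
  | n+1 =>
    let line := PySem.List.pyGetD lines (n : Int) ""
    if PySem.Str.isIn "<?" line then false
    else if PySem.Str.isIn "?>" line then true
    else pvAltGo lines n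

def is_in_html_block_py_alt (lines : List String) (line_num : Int) : Bool :=
  pvAltGo lines line_num.toNat

-- ===== PRECONDITION & SPEC =====
-- Pre_ excludes exactly the inputs where Python A raises IndexError: line_num beyond len(lines).
def Pre_is_in_html_block_py (lines : List String) (line_num : Int) : Prop :=
  line_num ≤ (lines.length : Int)
instance (lines : List String) (line_num : Int) : Decidable (Pre_is_in_html_block_py lines line_num) := by unfold Pre_is_in_html_block_py; infer_instance

def pvWitness_is_in_html_block_py : List String × Int := (["<?php echo 1; ?>", "<p>html</p>"], 2)

def Spec_is_in_html_block_py (lines : List String) (line_num : Int) (out : Bool) : Prop := out = is_in_html_block_py_alt lines line_num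
instance (lines : List String) (line_num : Int) (out : Bool) : Decidable (Spec_is_in_html_block_py lines line_num out) := by unfold Spec_is_in_html_block_py; infer_instance

-- ===== CLAIM (what is proved, stated in full; the proofs are below) =====
def Claim_equal_is_in_html_block_py : Prop := ∀ (lines : List String) (line_num : Int), Dom_is_in_html_block_py lines line_num → Pre_is_in_html_block_py lines line_num → Spec_is_in_html_block_py lines line_num (is_in_html_block_py lines line_num)

-- ===== LEMMAS AND PROOFS =====

-- '<?php' in l implies '<?' in l (the substring "<?" is a prefix of "<?php")
theorem pv_php_sub (l : List Char) (h : PySem.Chars.isIn ['<', '?', 'p', 'h', 'p'] l = true) :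
    PySem.Chars.isIn ['<', '?'] l = true := by
  rw [PySem.Chars.isIn_iff_infix] at h ⊢
  exact List.IsInfix.trans (List.IsPrefix.isInfix ⟨['p', 'h', 'p'], rfl⟩) h

def pvNoMarker (lines : List String) (n : Nat) : Bool :=
  (List.range n).all (fun k =>
    !PySem.Str.isIn "<?" (PySem.List.pyGetD lines (k : Int) "") &&
    !PySem.Str.isIn "?>" (PySem.List.pyGetD lines (k : Int) ""))

theorem pv_key (lines : List String) (n : Nat) (b : Bool) :
    (!((PySem.List.pyRange 0 (n : Int) 1).foldl
      (fun in_php i =>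
        let line := PySem.List.pyGetD lines i ""
        if PySem.Str.isIn "<?php" line || PySem.Str.isIn "<?" line then true
        else if PySem.Str.isIn "?>" line then false
        else in_php) b))
    = (pvAltGo lines n || (pvNoMarker lines n && !b)) := by
  induction n generalizing b with
  | zero => simp [PySem.List.pyRange_one_eq_nil, pvAltGo, pvNoMarker]
  | succ n ih =>
    have hsplit : PySem.List.pyRange 0 ((n + 1 : Nat) : Int) 1
        = PySem.List.pyRange 0 (n : Int) 1 ++ [(n : Int)] := by
      push_cast
      exact PySem.List.pyRange_one_succ_right (by positivity)
    rw [hsplit, List.foldl_append]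
    simp only [List.foldl_cons, List.foldl_nil]
    by_cases h2 : PySem.Chars.isIn ['<', '?'] ((lines[n]?.getD "")).toList = true
    · simp [pvAltGo, pvNoMarker, List.range_succ, h2]
    · have hphp : PySem.Chars.isIn ['<', '?', 'p', 'h', 'p'] ((lines[n]?.getD "")).toList = false := by
        by_contra hc
        exact h2 (pv_php_sub _ (by simpa using hc))
      by_cases h3 : PySem.Chars.isIn ['?', '>'] ((lines[n]?.getD "")).toList = true
      · simp [pvAltGo, pvNoMarker, List.range_succ, hphp, h2, h3]
      · have ih' := ih b
        simp [pvNoMarker] at ih'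
        simp [pvAltGo, pvNoMarker, List.range_succ, hphp, h2, h3, ih']

-- ===== VERDICT (by name: the statement is the Claim_ definition above) =====
theorem is_in_html_block_py_spec : Claim_equal_is_in_html_block_py := by
  intro lines line_num _ _
  unfold Spec_is_in_html_block_py is_in_html_block_py is_in_html_block_py_alt
  by_cases hn : 0 ≤ line_num
  · have : line_num = ((line_num.toNat : Nat) : Int) := by omega
    rw [this, Int.toNat_natCast]
    simpa using pv_key lines line_num.toNat true
  · have h1 : PySem.List.pyRange 0 line_num 1 = [] :=
      PySem.List.pyRange_one_eq_nil (by omega)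
    have h2 : line_num.toNat = 0 := by omega
    simp [h1, h2, pvAltGo]
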